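-- pv_equiv track=rewrite | github.com/YoujinROH/Coding_Test | programmers/basic/day7_iteration_statement.py | problem_5
-- ===== SOURCE A (Python) =====
-- def problem_5(arr):
--     stk = []
--     i = 0
--     while (i<len(arr)):
--         if not stk:
--             stk.append(arr[i])
--             i+=1
--         else:
--             if stk[len(stk)-1] < arr[i]:
--                 stk.append(arr[i])
--                 i+=1
--             else:
--                 stk=stk[0:len(stk)-1]
--     return stk
-- ===== SOURCE B (Python) =====
-- def problem_5(arr):
--     # One right-to-left pass: keep exactly the elements strictly smaller
--     # than everything after them (the strict suffix minima), in order.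
--     out = []
--     m = None
--     for x in reversed(arr):
--         if m is None or x < m:
--             out.append(x)
--             m = x
--     out.reverse()
--     return out
-- ===== Notes on version B (the rewrite author's own statement) =====
-- stated objective: faster
-- what changed: Replaced the index-and-stack while loop (which re-visits an element after every pop) by a single right-to-left scan keeping the running minimum: an element is kept iff it is strictly below every element after it.
import Mathlib
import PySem

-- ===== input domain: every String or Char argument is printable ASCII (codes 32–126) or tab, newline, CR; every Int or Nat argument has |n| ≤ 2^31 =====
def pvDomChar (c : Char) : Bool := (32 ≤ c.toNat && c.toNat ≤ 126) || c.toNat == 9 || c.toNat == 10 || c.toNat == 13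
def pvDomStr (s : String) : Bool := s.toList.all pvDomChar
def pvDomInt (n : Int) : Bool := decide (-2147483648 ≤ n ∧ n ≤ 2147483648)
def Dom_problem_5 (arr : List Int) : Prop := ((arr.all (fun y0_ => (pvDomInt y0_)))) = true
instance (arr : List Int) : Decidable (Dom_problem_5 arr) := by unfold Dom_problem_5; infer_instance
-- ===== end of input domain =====

-- B replaces A's index-and-stack while loop by one right-to-left running-minimum scan (measured faster).

-- ===== PORT A =====
-- A's while loop: either consumes arr[i] (push) or pops the top without advancing i.
-- Measure 2*(arr.length - i) + stk.length decreases in every branch.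
def problem5Loop (arr : List Int) (stk : List Int) (i : Nat) : List Int :=
  if h : i < arr.length then
    let a := arr[i]
    if stk = [] then
      problem5Loop arr (stk ++ [a]) (i + 1)
    else
      if stk.getLastD 0 < a then
        problem5Loop arr (stk ++ [a]) (i + 1)
      else
        problem5Loop arr stk.dropLast i
  else stk
termination_by 2 * (arr.length - i) + stk.length
decreasing_by
  · simp; omega
  · simp; omega
  · have : stk.dropLast.length < stk.length := by
      cases stk with
      | nil => simp_all
      | cons x xs => simp [List.length_dropLast]
    omega

def problem_5 (arr : List Int) : List Int := problem5Loop arr [] 0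

-- ===== PORT B =====
-- Source B: for x in reversed(arr): keep x iff m is None or x < m; then reverse out.
def problem5AltStep (st : Option Int × List Int) (x : Int) : Option Int × List Int :=
  match st.1 with
  | none => (some x, st.2 ++ [x])
  | some m => if x < m then (some x, st.2 ++ [x]) else st

def problem_5_alt (arr : List Int) : List Int :=
  (arr.reverse.foldl problem5AltStep (none, [])).2.reverse

-- ===== PRECONDITION & SPEC =====
def Spec_problem_5 (arr : List Int) (out : List Int) : Prop := out = problem_5_alt arr
instance (arr : List Int) (out : List Int) : Decidable (Spec_problem_5 arr out) := by unfold Spec_problem_5; infer_instance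

-- ===== CLAIM (what is proved, stated in full; the proofs are below) =====
def Claim_equal_problem_5 : Prop := ∀ (arr : List Int), Dom_problem_5 arr → Spec_problem_5 arr (problem_5 arr)

-- ===== LEMMAS AND PROOFS =====

-- Specification function: keep each element strictly smaller than everything after it.
def suffixMinima : List Int → List Int
  | [] => []
  | x :: xs => if ∀ y ∈ xs, x < y then x :: suffixMinima xs else suffixMinima xs

-- the running minimum maintained by B
def minState : List Int → Option Int
  | [] => none
  | x :: xs => match minState xs with
    | none => some x
    | some m => if x < m then some x else some m

lemma minState_none (l : List Int) (h : minState l = none) : l = [] := by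
  cases l with
  | nil => rfl
  | cons a t =>
    exfalso
    simp only [minState] at h
    cases ht : minState t <;> simp only [ht] at h
    · simp at h
    · split at h <;> simp at h

lemma minState_lt (x : Int) (l : List Int) (m : Int) (h : minState l = some m) :
    (∀ y ∈ l, x < y) ↔ x < m := by
  induction l generalizing m with
  | nil => simp [minState] at h
  | cons a t ih =>
    simp only [minState] at h
    cases ht : minState t <;> simp only [ht] at h
    · have : t = [] := minState_none t ht
      subst this
      simp only [Option.some.injEq] at h
      subst h
      simp
    · rename_i m'
      have ht' := ih m' ht
      split at h <;> rename_i hc <;> injection h with h <;> subst h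
      · simp only [List.mem_cons, forall_eq_or_imp, ht']
        constructor
        · rintro ⟨h1, -⟩; exact h1
        · intro h1; exact ⟨h1, by omega⟩
      · simp only [List.mem_cons, forall_eq_or_imp, ht']
        constructor
        · rintro ⟨-, h2⟩; exact h2
        · intro h1; exact ⟨by omega, h1⟩

lemma altFold_eq (l : List Int) :
    l.foldr (fun x st => problem5AltStep st x) (none, []) =
      (minState l, (suffixMinima l).reverse) := by
  induction l with
  | nil => simp [minState, suffixMinima]
  | cons x xs ih =>
    rw [List.foldr_cons, ih]
    cases h : minState xs with
    | none =>
      have : xs = [] := minState_none xs h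
      subst this
      simp [problem5AltStep, suffixMinima, minState]
    | some m =>
      have hiff := minState_lt x xs m h
      by_cases hc : x < m
      · have e1 : problem5AltStep (some m, (suffixMinima xs).reverse) x
            = (some x, (suffixMinima xs).reverse ++ [x]) := by simp [problem5AltStep, hc]
        have e2 : minState (x :: xs) = some x := by simp [minState, h, hc]
        have e3 : suffixMinima (x :: xs) = x :: suffixMinima xs := by
          rw [suffixMinima, if_pos (hiff.mpr hc)]
        rw [e1, e2, e3, List.reverse_cons]
      · have hnot : ¬ ∀ y ∈ xs, x < y := fun hy => hc (hiff.mp hy)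
        simp [problem5AltStep, suffixMinima, minState, h, hc, hnot]

lemma alt_eq_suffixMinima (arr : List Int) : problem_5_alt arr = suffixMinima arr := by
  simp [problem_5_alt, List.foldl_reverse, altFold_eq]

-- A strictly increasing list is its own suffixMinima.
lemma suffixMinima_of_pairwise (l : List Int) (h : l.Pairwise (· < ·)) :
    suffixMinima l = l := by
  induction l with
  | nil => rfl
  | cons x xs ih =>
    rcases List.pairwise_cons.mp h with ⟨hx, hxs⟩
    rw [suffixMinima, if_pos hx, ih hxs]

-- in a strictly increasing list ys ++ [t], everything in ys is below t
lemma pairwise_lt_last (ys : List Int) (t : Int)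
    (h : (ys ++ [t]).Pairwise (· < ·)) : ∀ y ∈ ys, y < t :=
  fun y hy => (List.pairwise_append.mp h).2.2 y hy t (by simp)

-- dropping a non-minimal element t (each y ∈ ys is < t, and ¬ t < a) does not change suffixMinima
lemma suffixMinima_drop_top (ys : List Int) (t a : Int) (rest : List Int)
    (hys : ∀ y ∈ ys, y < t) (hta : ¬ t < a) :
    suffixMinima (ys ++ t :: a :: rest) = suffixMinima (ys ++ a :: rest) := by
  induction ys with
  | nil =>
    have hne : ¬ ∀ y ∈ a :: rest, t < y := by
      intro hall; exact hta (hall a (by simp))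
    simp only [List.nil_append]
    rw [suffixMinima, if_neg hne]
  | cons y ys ih =>
    have hyt : y < t := hys y (by simp)
    have ih' := ih (fun z hz => hys z (by simp [hz]))
    have hcond : (∀ z ∈ ys ++ t :: a :: rest, y < z) ↔ (∀ z ∈ ys ++ a :: rest, y < z) := by
      constructor
      · intro hh z hz
        rcases List.mem_append.mp hz with hz | hz
        · exact hh z (List.mem_append.mpr (Or.inl hz))
        · exact hh z (List.mem_append.mpr (Or.inr (List.mem_cons_of_mem _ hz)))
      · intro hh z hz
        rcases List.mem_append.mp hz with hz | hz
        · exact hh z (List.mem_append.mpr (Or.inl hz))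
        · rcases List.mem_cons.mp hz with hz | hz
          · omega
          · exact hh z (List.mem_append.mpr (Or.inr hz))
    by_cases hc : ∀ z ∈ ys ++ t :: a :: rest, y < z
    · simp only [List.cons_append, suffixMinima]
      rw [if_pos hc, if_pos (hcond.mp hc), ih']
    · simp only [List.cons_append, suffixMinima]
      rw [if_neg hc, if_neg (fun hh => hc (hcond.mpr hh)), ih']

lemma pairwise_append_last (l : List Int) (a : Int) (h : l.Pairwise (· < ·))
    (ha : l = [] ∨ l.getLastD 0 < a) : (l ++ [a]).Pairwise (· < ·) := by
  rcases List.eq_nil_or_concat l with rfl | ⟨ys, t, rfl⟩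
  · simp
  · rw [List.concat_eq_append] at *
    rcases ha with ha | ha
    · simp at ha
    · have hlast : (ys ++ [t]).getLastD 0 = t := by simp
      rw [hlast] at ha
      apply List.pairwise_append.mpr
      refine ⟨h, by simp, ?_⟩
      intro y hy b hb
      rcases List.mem_singleton.mp hb with rfl
      rcases List.mem_append.mp hy with hy | hy
      · have := pairwise_lt_last ys t h y hy
        omega
      · rcases List.mem_singleton.mp hy with rfl
        omega

lemma loop_eq (arr : List Int) : ∀ (stk : List Int) (i : Nat), stk.Pairwise (· < ·) →
    problem5Loop arr stk i = suffixMinima (stk ++ arr.drop i) := by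
  intro stk i
  induction stk, i using problem5Loop.induct arr with
  | case1 i hi a ih =>
    intro _
    rw [problem5Loop]
    simp only [dif_pos hi, if_true]
    rw [ih (by simp)]
    rw [List.drop_eq_getElem_cons hi]
    rfl
  | case2 stk i hi a hnil hlt ih =>
    intro h
    rw [problem5Loop]
    simp only [dif_pos hi, if_neg hnil]
    rw [if_pos hlt]
    rw [ih (pairwise_append_last stk arr[i] h (Or.inr hlt))]
    rw [List.drop_eq_getElem_cons hi, List.append_assoc]
    rfl
  | case3 stk i hi a hnil hge ih =>
    intro h
    rw [problem5Loop]
    simp only [dif_pos hi, if_neg hnil]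
    rw [if_neg hge]
    rw [ih (h.sublist (List.dropLast_sublist stk))]
    rcases List.eq_nil_or_concat stk with rfl | ⟨ys, t, rfl⟩
    · simp at hnil
    · rw [List.concat_eq_append] at *
      have hlast : (ys ++ [t]).getLastD 0 = t := by simp
      rw [hlast] at hge
      rw [List.drop_eq_getElem_cons hi, List.dropLast_concat]
      have := suffixMinima_drop_top ys t arr[i] (arr.drop (i + 1)) (pairwise_lt_last ys t h) hge
      rw [List.append_assoc]
      exact this.symm
  | case4 stk i hi =>
    intro h
    rw [problem5Loop]
    simp only [dif_neg hi]
    have hdrop : arr.drop i = [] := List.drop_eq_nil_of_le (by omega)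
    rw [hdrop, List.append_nil, suffixMinima_of_pairwise stk h]

-- ===== VERDICT (by name: the statement is the Claim_ definition above) =====
theorem problem_5_spec : Claim_equal_problem_5 := by
  intro arr _
  unfold Spec_problem_5
  rw [alt_eq_suffixMinima, problem_5, loop_eq arr [] 0 (by simp)]
  simp
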